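-- pv_equiv track=rewrite | github.com/Chris1320/LostLittleScripts | playground/python/ip_calculator.py | _CIDRToMask
-- ===== SOURCE A (Python) =====
-- def _CIDRToMask(cidr: int) -> str:
--     """
--     Convert a CIDR (like `/24`) to its decimal representation (255.255.255.0).
--     """
--
--     mask: str = ''
--     for i in range(4):
--         if i < cidr // 8:
--             mask += '255.'
--
--         elif i == cidr // 8:
--             mask += str(256 - 2**(8 - cidr % 8)) + '.'
--
--         else:
--             mask += '0.'
--
--     return mask[:-1]
-- ===== SOURCE B (Python) =====
-- def _CIDRToMask(cidr: int) -> str: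
--     n = max(0, min(32, cidr))
--     mask = (0xFFFFFFFF << (32 - n)) & 0xFFFFFFFF
--     return '.'.join(str((mask >> s) & 0xFF) for s in (24, 16, 8, 0))
-- ===== Notes on version B (the rewrite author's own statement) =====
-- stated objective: idiomatic
-- what changed: Replaces the per-octet three-way branch on cidr//8 with whole-address bit manipulation: clamp the prefix to [0,32], build the 32-bit mask with one shift, and extract the four octets by shift-and-mask.
import Mathlib
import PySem

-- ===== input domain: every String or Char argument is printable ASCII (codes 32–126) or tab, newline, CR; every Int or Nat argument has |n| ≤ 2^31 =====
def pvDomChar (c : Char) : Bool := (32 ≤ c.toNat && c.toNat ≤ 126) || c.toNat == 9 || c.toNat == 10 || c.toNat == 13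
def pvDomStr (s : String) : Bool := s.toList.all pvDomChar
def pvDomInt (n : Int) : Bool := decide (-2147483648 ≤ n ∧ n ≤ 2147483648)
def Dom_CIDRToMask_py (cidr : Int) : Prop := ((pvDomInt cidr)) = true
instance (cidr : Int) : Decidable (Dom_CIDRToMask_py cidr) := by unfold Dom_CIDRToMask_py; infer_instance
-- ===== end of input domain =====

-- B replaces A's per-octet branching on cidr//8 by clamping the prefix and extracting the
-- octets of one 32-bit mask integer (idiomatic netmask computation); same return value everywhere.

-- ===== PORT A =====
def CIDRToMask_py (cidr : Int) : String :=
  let mask : String :=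
    (PySem.List.pyRange 0 4 1).foldl (fun mask i =>
      if i < PySem.Int.floordiv cidr 8 then mask ++ "255."
      else if i = PySem.Int.floordiv cidr 8 then
        mask ++ (PySem.Int.toStr (256 - 2 ^ (8 - PySem.Int.mod cidr 8).toNat) ++ ".")
      else mask ++ "0.") ""
  PySem.Str.slice mask none (some (-1))

-- ===== PORT B =====
-- the shifted quantities are nonnegative Python ints, computed here in Nat (exact)
def CIDRToMask_py_alt (cidr : Int) : String :=
  let n : Int := max 0 (min 32 cidr)
  let mask : Nat := (0xFFFFFFFF <<< (32 - n).toNat) &&& 0xFFFFFFFF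
  PySem.Str.join "." ([24, 16, 8, 0].map (fun s => PySem.Int.toStr ((mask >>> s) &&& 0xFF : Nat)))

-- ===== PRECONDITION & SPEC =====
def Spec_CIDRToMask_py (cidr : Int) (out : String) : Prop := out = CIDRToMask_py_alt cidr
instance (cidr : Int) (out : String) : Decidable (Spec_CIDRToMask_py cidr out) := by unfold Spec_CIDRToMask_py; infer_instance

-- ===== CLAIM (what is proved, stated in full; the proofs are below) =====
def Claim_equal_CIDRToMask_py : Prop := ∀ (cidr : Int), Dom_CIDRToMask_py cidr → Spec_CIDRToMask_py cidr (CIDRToMask_py cidr)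

-- ===== LEMMAS AND PROOFS =====

lemma A_ge32 (cidr : Int) (h : 32 ≤ cidr) : CIDRToMask_py cidr = "255.255.255.255" := by
  have hq : 4 ≤ PySem.Int.floordiv cidr 8 := by
    rw [PySem.Int.le_floordiv_iff_mul_le (by omega)]; omega
  have e : PySem.List.pyRange 0 4 1 = [0, 1, 2, 3] := by decide
  simp only [CIDRToMask_py, e, List.foldl,
    if_pos (show (0:Int) < PySem.Int.floordiv cidr 8 by omega),
    if_pos (show (1:Int) < PySem.Int.floordiv cidr 8 by omega),
    if_pos (show (2:Int) < PySem.Int.floordiv cidr 8 by omega),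
    if_pos (show (3:Int) < PySem.Int.floordiv cidr 8 by omega)]
  decide

lemma A_neg (cidr : Int) (h : cidr < 0) : CIDRToMask_py cidr = "0.0.0.0" := by
  have hq : PySem.Int.floordiv cidr 8 < 0 := by
    rw [PySem.Int.floordiv_lt_iff_lt_mul (by omega)]; omega
  have e : PySem.List.pyRange 0 4 1 = [0, 1, 2, 3] := by decide
  simp only [CIDRToMask_py, e, List.foldl,
    if_neg (show ¬ (0:Int) < PySem.Int.floordiv cidr 8 by omega),
    if_neg (show ¬ (1:Int) < PySem.Int.floordiv cidr 8 by omega),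
    if_neg (show ¬ (2:Int) < PySem.Int.floordiv cidr 8 by omega),
    if_neg (show ¬ (3:Int) < PySem.Int.floordiv cidr 8 by omega),
    if_neg (show ¬ (0:Int) = PySem.Int.floordiv cidr 8 by omega),
    if_neg (show ¬ (1:Int) = PySem.Int.floordiv cidr 8 by omega),
    if_neg (show ¬ (2:Int) = PySem.Int.floordiv cidr 8 by omega),
    if_neg (show ¬ (3:Int) = PySem.Int.floordiv cidr 8 by omega)]
  decide

lemma B_ge32 (cidr : Int) (h : 32 ≤ cidr) : CIDRToMask_py_alt cidr = "255.255.255.255" := by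
  have e : max 0 (min 32 cidr) = 32 := by omega
  simp only [CIDRToMask_py_alt, e]
  decide

lemma B_neg (cidr : Int) (h : cidr < 0) : CIDRToMask_py_alt cidr = "0.0.0.0" := by
  have e : max 0 (min 32 cidr) = 0 := by omega
  simp only [CIDRToMask_py_alt, e]
  decide

-- ===== VERDICT (by name: the statement is the Claim_ definition above) =====
theorem CIDRToMask_py_spec : Claim_equal_CIDRToMask_py := by
  intro cidr _
  unfold Spec_CIDRToMask_py
  rcases lt_or_ge cidr 0 with h | h
  · rw [A_neg cidr h, B_neg cidr h]
  · rcases lt_or_ge cidr 32 with h2 | h2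
    · interval_cases cidr <;> decide
    · rw [A_ge32 cidr h2, B_ge32 cidr h2]
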